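-- pv_equiv track=rewrite | github.com/electric-heon/autohwpeq | app.py | parse_math_text
-- ===== SOURCE A (Python) =====
-- def parse_math_text(text):
--     """$로 구분된 텍스트에서 수식과 일반 텍스트를 분리"""
--     parts = []
--     segments = text.split('$')
--
--     for i, segment in enumerate(segments):
--         if segment:
--             if i % 2 == 0:  # 짝수 인덱스 = 일반 텍스트
--                 parts.append(('text', segment))
--             else:  # 홀수 인덱스 = 수식
--                 parts.append(('math', segment))
--
--     return parts
-- ===== SOURCE B (Python) =====
-- def parse_math_text(text):
--     """$로 구분된 텍스트에서 수식과 일반 텍스트를 분리"""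
--     parts = []
--     buf = ''
--     count = 0
--     for ch in text:
--         if ch == '$':
--             if buf:
--                 parts.append(('text' if count % 2 == 0 else 'math', buf))
--                 buf = ''
--             count += 1
--         else:
--             buf += ch
--     if buf:
--         parts.append(('text' if count % 2 == 0 else 'math', buf))
--     return parts
-- ===== Notes on version B (the rewrite author's own statement) =====
-- stated objective: alternative
-- what changed: Replaces str.split-plus-enumerate over segments with a single character-by-character scan that keeps a buffer and a delimiter counter and classifies each flushed buffer by the counter's parity.
import Mathlib
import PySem

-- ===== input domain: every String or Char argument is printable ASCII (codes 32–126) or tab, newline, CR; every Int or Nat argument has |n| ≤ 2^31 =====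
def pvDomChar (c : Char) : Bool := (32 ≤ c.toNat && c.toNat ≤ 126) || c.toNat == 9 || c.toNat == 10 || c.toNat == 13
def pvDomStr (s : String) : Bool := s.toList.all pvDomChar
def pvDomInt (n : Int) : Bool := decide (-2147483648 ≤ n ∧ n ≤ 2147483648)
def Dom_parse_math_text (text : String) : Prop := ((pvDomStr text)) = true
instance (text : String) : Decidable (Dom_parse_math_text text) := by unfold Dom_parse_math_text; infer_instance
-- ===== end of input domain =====

-- B is an alternative single-pass scan (buffer + delimiter counter) instead of A's split('$') + enumerate.

-- ===== PORT A =====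
def parse_math_text (text : String) : List (String × String) :=
  let segments := (PySem.Chars.splitOn text.toList ['$']).map String.ofList
  (PySem.List.enumerate segments 0).foldl
    (fun parts p =>
      if p.2 ≠ "" then
        if PySem.Int.mod p.1 2 = 0 then parts ++ [("text", p.2)]
        else parts ++ [("math", p.2)]
      else parts) []

-- ===== PORT B =====
-- tag of the current buffer from the delimiter counter's parity
def pvTagB (count : Nat) : String := if count % 2 = 0 then "text" else "math"

-- the for-loop of Source B: state = (buffer, delimiter counter)
def pvScanB : List Char → List Char → Nat → List (String × String)
  | [], buf, count => if buf ≠ [] then [(pvTagB count, String.ofList buf)] else []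
  | c :: cs, buf, count =>
    if c = '$' then
      (if buf ≠ [] then [(pvTagB count, String.ofList buf)] else []) ++ pvScanB cs [] (count + 1)
    else pvScanB cs (buf ++ [c]) count

def parse_math_text_alt (text : String) : List (String × String) :=
  pvScanB text.toList [] 0

-- ===== PRECONDITION & SPEC =====
def Spec_parse_math_text (text : String) (out : List (String × String)) : Prop := out = parse_math_text_alt text
instance (text : String) (out : List (String × String)) : Decidable (Spec_parse_math_text text out) := by unfold Spec_parse_math_text; infer_instance

-- ===== CLAIM (what is proved, stated in full; the proofs are below) =====
def Claim_equal_parse_math_text : Prop := ∀ (text : String), Dom_parse_math_text text → Spec_parse_math_text text (parse_math_text text)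

-- ===== LEMMAS AND PROOFS =====

-- proof helper: structural form of splitOn on separator ['$'], cur the in-order current segment
def pvSplit : List Char → List Char → List (List Char)
  | [], cur => [cur]
  | c :: rest, cur => if c = '$' then cur :: pvSplit rest [] else pvSplit rest (cur ++ [c])

lemma pvSplitOn_go_eq (l : List Char) : ∀ (fuel : Nat) (cur : List Char) (acc : List (List Char)),
    l.length ≤ fuel →
    PySem.Chars.splitOn.go ['$'] fuel l cur acc = acc.reverse ++ pvSplit l cur.reverse := by
  induction l with
  | nil =>
    intro fuel cur acc _
    cases fuel <;> simp [PySem.Chars.splitOn.go, pvSplit]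
  | cons c rest ih =>
    intro fuel cur acc h
    cases fuel with
    | zero => exact absurd (by simpa using h : rest.length + 1 ≤ 0) (by omega)
    | succ n =>
      simp only [PySem.Chars.splitOn.go]
      by_cases hc : c = '$'
      · subst hc
        simp only [List.isPrefixOf, BEq.rfl, Bool.true_and, List.isPrefixOf_nil_left, if_true,
          List.length_cons, List.length_nil, List.drop_succ_cons, List.drop_zero]
        rw [ih n [] (cur.reverse :: acc) (by simpa using Nat.le_of_succ_le_succ h)]
        simp [pvSplit]
      · have hpre : List.isPrefixOf ['$'] (c :: rest) = false := by
          simp [List.isPrefixOf]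
          exact fun he => (hc he.symm).elim
        simp only [hpre, Bool.false_eq_true, if_false]
        rw [ih n (c :: cur) acc (by simpa using Nat.le_of_succ_le_succ h)]
        simp [pvSplit, hc]

lemma pvSplitOn_eq (cs : List Char) : PySem.Chars.splitOn cs ['$'] = pvSplit cs [] := by
  unfold PySem.Chars.splitOn
  simpa using pvSplitOn_go_eq cs (cs.length + 1) [] [] (Nat.le_succ _)

-- proof helper: A's per-segment emission starting at index i
def pvEmit : List (List Char) → Nat → List (String × String)
  | [], _ => []
  | s :: rest, i =>
    (if s ≠ [] then [(pvTagB i, String.ofList s)] else []) ++ pvEmit rest (i + 1)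

lemma pvScanB_eq_emit (cs : List Char) : ∀ (buf : List Char) (count : Nat),
    pvScanB cs buf count = pvEmit (pvSplit cs buf) count := by
  induction cs with
  | nil => intro buf count; simp [pvScanB, pvSplit, pvEmit]
  | cons c rest ih =>
    intro buf count
    by_cases hc : c = '$'
    · subst hc
      simp [pvScanB, pvSplit, pvEmit, ih]
    · simp [pvScanB, pvSplit, hc, ih]

lemma pvFoldA_eq_emit (segs : List (List Char)) : ∀ (i : Nat) (acc : List (String × String)),
    (PySem.List.enumerate (segs.map String.ofList) (i : Int)).foldl
      (fun parts p =>
        if p.2 ≠ "" then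
          if PySem.Int.mod p.1 2 = 0 then parts ++ [("text", p.2)]
          else parts ++ [("math", p.2)]
        else parts) acc = acc ++ pvEmit segs i := by
  induction segs with
  | nil => intro i acc; simp [PySem.List.enumerate_nil, pvEmit]
  | cons s rest ih =>
    intro i acc
    simp only [List.map_cons, PySem.List.enumerate_cons, List.foldl_cons]
    have hcast : ((i : Int) + 1) = ((i + 1 : Nat) : Int) := by push_cast; ring
    rw [hcast, ih (i + 1)]
    by_cases hs : s = []
    · subst hs; simp [pvEmit]
    · have hne : String.ofList s ≠ "" := by
        simpa [String.ext_iff] using hs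
      have hdvd : ((2:Int) ∣ (i:Int)) ↔ i % 2 = 0 := by omega
      by_cases hp : i % 2 = 0 <;>
        simp [pvEmit, hne, hs, pvTagB, hp, hdvd]

-- ===== VERDICT (by name: the statement is the Claim_ definition above) =====
theorem parse_math_text_spec : Claim_equal_parse_math_text := by
  intro text _
  show _ = _
  unfold parse_math_text parse_math_text_alt
  rw [pvSplitOn_eq, pvScanB_eq_emit]
  simpa using pvFoldA_eq_emit (pvSplit text.toList []) 0 []
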